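-- pv_equiv track=rewrite | github.com/Caibao7/SceneImg | util/index_existing.py | summarise_changes
-- ===== SOURCE A (Python) =====
-- from typing import Iterable, Optional
--
-- def entry_path(entry: dict, mode: str) -> Optional[str]:
--     key = "target" if mode == "filtered" else "path"
--     value = entry.get(key)
--     return value if isinstance(value, str) else None
--
-- def summarise_changes(existing: list[dict], current: list[dict], mode: str) -> tuple[int, int, int]:
--     existing_by_path: dict[str, dict] = {}
--     for entry in existing:
--         if not isinstance(entry, dict):
--             continue
--         path_key = entry_path(entry, mode)
--         if path_key:
--             existing_by_path[path_key] = entry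
--
--     current_by_path: dict[str, dict] = {}
--     for entry in current:
--         if not isinstance(entry, dict):
--             continue
--         path_key = entry_path(entry, mode)
--         if path_key:
--             current_by_path[path_key] = entry
--
--     added_keys = set(current_by_path) - set(existing_by_path)
--     removed_keys = set(existing_by_path) - set(current_by_path)
--     shared_keys = set(current_by_path) & set(existing_by_path)
--     updated = sum(
--         1
--         for key in shared_keys
--         if current_by_path[key] != existing_by_path[key]
--     )
--     return len(added_keys), len(removed_keys), updated
-- ===== SOURCE B (Python) =====
-- from typing import Optional
--
-- def entry_path(entry: dict, mode: str) -> Optional[str]: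
--     key = "target" if mode == "filtered" else "path"
--     value = entry.get(key)
--     return value if isinstance(value, str) else None
--
-- def summarise_changes(existing: list, current: list, mode: str):
--     # One merged map key -> (old_entry_or_None, new_entry_or_None), then a single
--     # classification pass over its slots; no separate per-side dicts, no set algebra.
--     merged = {}
--     for entry in existing:
--         if isinstance(entry, dict):
--             pk = entry_path(entry, mode)
--             if pk:
--                 merged[pk] = (entry, None)  # last wins, same as dict assignment in A
--     for entry in current:
--         if isinstance(entry, dict):
--             pk = entry_path(entry, mode)
--             if pk:
--                 slot = merged.get(pk)
--                 merged[pk] = (slot[0] if slot else None, entry)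
--     added = removed = updated = 0
--     for old, new in merged.values():
--         if old is None:
--             added += 1
--         elif new is None:
--             removed += 1
--         elif new != old:
--             updated += 1
--     return added, removed, updated
-- ===== Notes on version B (the rewrite author's own statement) =====
-- stated objective: alternative
-- what changed: B replaces A's two per-side dicts plus three set operations and a sum over shared keys by ONE merged map from key to an (old_entry, new_entry) slot pair filled by both input passes, and a single classification pass over the slots counting added/removed/updated.
import Mathlib
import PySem

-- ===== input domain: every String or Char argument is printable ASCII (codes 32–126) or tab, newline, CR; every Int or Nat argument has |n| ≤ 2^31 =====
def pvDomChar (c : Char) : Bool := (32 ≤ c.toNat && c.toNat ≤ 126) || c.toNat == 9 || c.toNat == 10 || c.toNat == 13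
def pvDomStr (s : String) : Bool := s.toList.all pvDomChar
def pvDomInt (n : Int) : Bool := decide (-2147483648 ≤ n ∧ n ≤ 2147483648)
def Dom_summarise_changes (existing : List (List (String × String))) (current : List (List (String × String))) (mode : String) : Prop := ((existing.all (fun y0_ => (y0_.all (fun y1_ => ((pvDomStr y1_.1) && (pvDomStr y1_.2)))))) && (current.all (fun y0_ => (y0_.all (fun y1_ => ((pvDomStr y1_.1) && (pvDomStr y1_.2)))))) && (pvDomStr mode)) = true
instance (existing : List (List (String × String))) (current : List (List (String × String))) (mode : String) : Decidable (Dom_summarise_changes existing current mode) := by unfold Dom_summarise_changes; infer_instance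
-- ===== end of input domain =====

-- B replaces A's two per-side dicts + three set operations + sum over shared keys by ONE
-- merged map key -> (old, new) slot filled by both passes and a single classification pass
-- over the slots (objective: alternative decomposition, same asymptotic cost).

-- ===== PORT A =====
-- entries are Python dicts; an entry value `List (String × String)` is read through
-- PySem.Dict.ofList (duplicate keys collapse last-wins, exactly as dict(pairs))
def entry_path (entry : List (String × String)) (mode : String) : Option String :=
  let key := if mode == "filtered" then "target" else "path"
  (PySem.Dict.ofList entry).get? key
  -- isinstance(value, str) is always true when the key is present (values are strings)

-- Python dict equality (`==` on two dicts ignores order and collapsed duplicates): exact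
def pyDictEq (a b : List (String × String)) : Bool :=
  let da := PySem.Dict.ofList a
  let db := PySem.Dict.ofList b
  da.items.all (fun p => db.get? p.1 == some p.2) && db.items.all (fun p => da.get? p.1 == some p.2)

-- A's two identical dict-building loops
def by_path (entries : List (List (String × String))) (mode : String) :
    PySem.Dict String (List (String × String)) :=
  entries.foldl (fun d entry =>
    -- `if not isinstance(entry, dict): continue` never fires (entries are dicts)
    match entry_path entry mode with
    | some pk => if pk == "" then d else d.insert pk entry   -- `if path_key:`
    | none => d) PySem.Dict.empty

def summarise_changes (existing : List (List (String × String))) (current : List (List (String × String))) (mode : String) : Int × Int × Int :=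
  let e := by_path existing mode
  let c := by_path current mode
  let added_keys := PySem.Set.diff (PySem.Set.ofList c.keys) (PySem.Set.ofList e.keys)
  let removed_keys := PySem.Set.diff (PySem.Set.ofList e.keys) (PySem.Set.ofList c.keys)
  let shared_keys := PySem.Set.inter (PySem.Set.ofList c.keys) (PySem.Set.ofList e.keys)
  -- sum(1 for key in shared_keys if current_by_path[key] != existing_by_path[key])
  -- (order over the set is irrelevant for a sum; `d[key]` never raises: key is shared)
  let updated : Int := shared_keys.foldl
    (fun acc k => if !pyDictEq (c.getD k []) (e.getD k []) then acc + 1 else acc) 0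
  (PySem.Set.len added_keys, PySem.Set.len removed_keys, updated)

-- ===== PORT B =====
-- first loop: merged[pk] = (entry, None)
def merged_first (existing : List (List (String × String))) (mode : String) :
    PySem.Dict String (Option (List (String × String)) × Option (List (String × String))) :=
  existing.foldl (fun m entry =>
    match entry_path entry mode with
    | some pk => if pk == "" then m else m.insert pk (some entry, none)
    | none => m) PySem.Dict.empty

-- second loop: slot = merged.get(pk); merged[pk] = (slot[0] if slot else None, entry)
def merged_both (m0 : PySem.Dict String (Option (List (String × String)) × Option (List (String × String))))
    (current : List (List (String × String))) (mode : String) :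
    PySem.Dict String (Option (List (String × String)) × Option (List (String × String))) :=
  current.foldl (fun m entry =>
    match entry_path entry mode with
    | some pk => if pk == "" then m else
        m.insert pk ((match m.get? pk with | some slot => slot.1 | none => none), some entry)
    | none => m) m0

def summarise_changes_alt (existing : List (List (String × String))) (current : List (List (String × String))) (mode : String) : Int × Int × Int :=
  let merged := merged_both (merged_first existing mode) current mode
  -- single classification pass over merged.values()
  merged.values.foldl (fun (s : Int × Int × Int) slot =>
    match slot with
    | (none, _) => (s.1 + 1, s.2.1, s.2.2)                                 -- added += 1
    | (some _, none) => (s.1, s.2.1 + 1, s.2.2)                            -- removed += 1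
    | (some o, some n) => if !pyDictEq n o then (s.1, s.2.1, s.2.2 + 1) else s)  -- updated += 1
    (0, 0, 0)

-- ===== PRECONDITION & SPEC =====
def Spec_summarise_changes (existing : List (List (String × String))) (current : List (List (String × String))) (mode : String) (out : Int × Int × Int) : Prop := out = summarise_changes_alt existing current mode
instance (existing : List (List (String × String))) (current : List (List (String × String))) (mode : String) (out : Int × Int × Int) : Decidable (Spec_summarise_changes existing current mode out) := by unfold Spec_summarise_changes; infer_instance

-- ===== CLAIM (what is proved, stated in full; the proofs are below) =====
def Claim_equal_summarise_changes : Prop := ∀ (existing : List (List (String × String))) (current : List (List (String × String))) (mode : String), Dom_summarise_changes existing current mode → Spec_summarise_changes existing current mode (summarise_changes existing current mode)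

-- ===== LEMMAS AND PROOFS =====

-- merge of the two sides' lookups: the slot B's merged map holds at a key
def mergeO (o n : Option (List (String × String))) :
    Option (Option (List (String × String)) × Option (List (String × String))) :=
  match o, n with
  | none, none => none
  | _, _ => some (o, n)

-- keys stay Nodup through any "skip or insert at entry_path" loop (covers A's and B's loops)
theorem nodup_keys_loop {ν : Type} (mode : String)
    (v : PySem.Dict String ν → List (String × String) → String → ν) :
    ∀ (l : List (List (String × String))) (d : PySem.Dict String ν), d.keys.Nodup →
      (l.foldl (fun m entry =>
        match entry_path entry mode with
        | some pk => if pk == "" then m else m.insert pk (v m entry pk)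
        | none => m) d).keys.Nodup := by
  intro l
  induction l with
  | nil => intro d hd; simpa using hd
  | cons x xs ih =>
    intro d hd
    simp only [List.foldl_cons]
    apply ih
    cases entry_path x mode with
    | none => exact hd
    | some pk =>
      by_cases h : pk == ""
      · simp [h, hd]
      · simp only [h]
        simpa using PySem.Dict.nodup_keys_insert d pk (v d x pk) hd

theorem nodup_keys_by_path (entries : List (List (String × String))) (mode : String) :
    (by_path entries mode).keys.Nodup := by
  unfold by_path
  exact nodup_keys_loop mode (fun _ e _ => e) entries PySem.Dict.empty
    (by simp [PySem.Dict.keys, PySem.Dict.empty])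

theorem nodup_keys_merged (existing current : List (List (String × String))) (mode : String) :
    (merged_both (merged_first existing mode) current mode).keys.Nodup := by
  unfold merged_both
  refine nodup_keys_loop mode
    (fun m entry pk => ((match m.get? pk with | some slot => slot.1 | none => none), some entry))
    current (merged_first existing mode) ?_
  unfold merged_first
  exact nodup_keys_loop mode (fun _ e _ => (some e, none)) existing PySem.Dict.empty
    (by simp [PySem.Dict.keys, PySem.Dict.empty])

-- after B's first loop the merged map is A's existing_by_path with values tagged (v, None)
theorem merged_first_get (existing : List (List (String × String))) (mode : String) (k : String) :
    (merged_first existing mode).get? k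
      = ((by_path existing mode).get? k).map (fun v => (some v, none)) := by
  unfold merged_first by_path
  suffices h : ∀ (l : List (List (String × String)))
      (d : PySem.Dict String (List (String × String)))
      (m : PySem.Dict String (Option (List (String × String)) × Option (List (String × String)))),
      (∀ k, m.get? k = (d.get? k).map (fun v => (some v, none))) →
      ∀ k, (l.foldl (fun m entry =>
        match entry_path entry mode with
        | some pk => if pk == "" then m else m.insert pk (some entry, none)
        | none => m) m).get? k
        = ((l.foldl (fun d entry =>
            match entry_path entry mode with
            | some pk => if pk == "" then d else d.insert pk entry
            | none => d) d).get? k).map (fun v => (some v, none)) by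
    exact h existing PySem.Dict.empty PySem.Dict.empty (by intro k; rfl) k
  intro l
  induction l with
  | nil => intro d m h k; simpa using h k
  | cons x xs ih =>
    intro d m h k
    simp only [List.foldl_cons]
    cases entry_path x mode with
    | none => exact ih d m h k
    | some pk =>
      by_cases hpk : pk == ""
      · simp only [hpk]; exact ih d m h k
      · simp only [hpk, Bool.false_eq_true, if_false]
        apply ih
        intro k'
        rw [PySem.Dict.get?_insert, PySem.Dict.get?_insert]
        by_cases hk : k' = pk <;> simp [hk, h k']

-- after B's second loop, merged holds (existing lookup, current lookup) at every key
theorem merged_both_get (existing current : List (List (String × String))) (mode : String) (k : String) :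
    (merged_both (merged_first existing mode) current mode).get? k
      = mergeO ((by_path existing mode).get? k) ((by_path current mode).get? k) := by
  unfold merged_both
  set e := by_path existing mode with he
  suffices h : ∀ (l : List (List (String × String)))
      (d : PySem.Dict String (List (String × String)))
      (m : PySem.Dict String (Option (List (String × String)) × Option (List (String × String)))),
      (∀ k, m.get? k = mergeO (e.get? k) (d.get? k)) →
      ∀ k, (l.foldl (fun m entry =>
        match entry_path entry mode with
        | some pk => if pk == "" then m else
            m.insert pk ((match m.get? pk with | some slot => slot.1 | none => none), some entry)
        | none => m) m).get? k
        = mergeO (e.get? k) ((l.foldl (fun d entry =>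
            match entry_path entry mode with
            | some pk => if pk == "" then d else d.insert pk entry
            | none => d) d).get? k) by
    refine h current PySem.Dict.empty (merged_first existing mode) ?_ k
    intro k
    rw [merged_first_get, ← he]
    cases e.get? k <;> rfl
  intro l
  induction l with
  | nil => intro d m h k; simpa using h k
  | cons x xs ih =>
    intro d m h k
    simp only [List.foldl_cons]
    cases entry_path x mode with
    | none => exact ih d m h k
    | some pk =>
      by_cases hpk : pk == ""
      · simp only [hpk]; exact ih d m h k
      · simp only [hpk, Bool.false_eq_true, if_false]
        apply ih
        intro k'
        rw [PySem.Dict.get?_insert, PySem.Dict.get?_insert]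
        by_cases hk : k' = pk
        · subst hk
          simp only [h k']
          cases he' : e.get? k' <;> cases hd' : d.get? k' <;> simp [mergeO]
        · simp [hk, h k']

-- B's classification fold in closed form
theorem triplefold (l : List (Option (List (String × String)) × Option (List (String × String))))
    (a r u : Int) :
    l.foldl (fun (s : Int × Int × Int) slot =>
      match slot with
      | (none, _) => (s.1 + 1, s.2.1, s.2.2)
      | (some _, none) => (s.1, s.2.1 + 1, s.2.2)
      | (some o, some n) => if !pyDictEq n o then (s.1, s.2.1, s.2.2 + 1) else s) (a, r, u)
    = (a + (l.countP (fun slot => slot.1.isNone) : Int),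
       r + (l.countP (fun slot => slot.1.isSome && slot.2.isNone) : Int),
       u + (l.countP (fun slot =>
          match slot with
          | (some o, some n) => !pyDictEq n o
          | _ => false) : Int)) := by
  induction l generalizing a r u with
  | nil => simp
  | cons slot l ih =>
    simp only [List.foldl_cons, List.countP_cons]
    obtain ⟨o, n⟩ := slot
    cases o with
    | none =>
      rw [ih]
      simp only [Option.isNone_none, Option.isSome_none, Bool.false_and, Prod.mk.injEq]
      refine ⟨by push_cast; ring, by simp, by simp⟩
    | some ov =>
      cases n with
      | none =>
        rw [ih]
        simp only [Option.isNone_some, Option.isNone_none, Option.isSome_some, Bool.and_true,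
          Prod.mk.injEq]
        refine ⟨by simp, by push_cast; ring, by simp⟩
      | some nv =>
        by_cases hq : pyDictEq nv ov
        · simp only [hq, Bool.not_true, Bool.false_eq_true, if_false]
          rw [ih]
          simp
        · simp only [Bool.not_eq_true] at hq
          simp only [hq, Bool.not_false]
          rw [ih]
          simp only [Option.isNone_some, Option.isSome_some, Bool.and_false,
            Bool.false_eq_true, if_false, Nat.add_zero, Prod.mk.injEq]
          refine ⟨by simp, by simp, by push_cast; ring⟩

theorem main_eq (existing current : List (List (String × String))) (mode : String) :
    summarise_changes existing current mode = summarise_changes_alt existing current mode := by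
  simp only [summarise_changes, summarise_changes_alt]
  have he := nodup_keys_by_path existing mode
  have hc := nodup_keys_by_path current mode
  have hm := nodup_keys_merged existing current mode
  set e := by_path existing mode with hedef
  set c := by_path current mode with hcdef
  set M := merged_both (merged_first existing mode) current mode with hMdef
  -- pointwise description of the merged map
  have hMget : ∀ k, M.get? k = mergeO (e.get? k) (c.get? k) := fun k =>
    merged_both_get existing current mode k
  have hmemM : ∀ k, k ∈ M.keys ↔ k ∈ e.keys ∨ k ∈ c.keys := by
    intro k
    rw [← not_iff_not]
    push Not
    rw [← PySem.Dict.get?_eq_none_iff_not_mem_keys, ← PySem.Dict.get?_eq_none_iff_not_mem_keys,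
      ← PySem.Dict.get?_eq_none_iff_not_mem_keys, hMget k]
    cases e.get? k <;> cases c.get? k <;> simp [mergeO]
  have hgetD : ∀ k ∈ M.keys, M.getD k (none, none) = (e.get? k, c.get? k) := by
    intro k hk
    have hne : M.get? k ≠ none := by
      rw [Ne, PySem.Dict.get?_eq_none_iff_not_mem_keys]; exact fun h => h hk
    rw [hMget k] at hne
    cases hek : e.get? k <;> cases hck : c.get? k
    · exact absurd (by rw [hek, hck] at hne ⊢; rfl) hne
    all_goals exact PySem.Dict.getD_of_get?_eq_some M (none, none) (by rw [hMget k, hek, hck]; rfl)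
  -- B side: values → merged keys → the canonical key list K
  rw [PySem.Dict.values_eq_map_keys M hm (none, none), triplefold]
  simp only [List.countP_map, Function.comp_def, zero_add]
  set K := e.keys ++ c.keys.filter (fun k => !decide (k ∈ e.keys)) with hKdef
  have hKnodup : K.Nodup := by
    refine he.append (hc.filter _) ?_
    intro a ha hafil
    have := (List.mem_filter.mp hafil).2
    simp_all
  have hperm : M.keys.Perm K := by
    rw [List.perm_ext_iff_of_nodup hm hKnodup]
    intro k
    rw [hmemM k, hKdef]
    simp only [List.mem_append, List.mem_filter, Bool.not_eq_eq_eq_not, Bool.not_true,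
      decide_eq_false_iff_not]
    tauto
  rw [hperm.countP_eq, hperm.countP_eq, hperm.countP_eq]
  have hmemK : ∀ k ∈ K, k ∈ M.keys := by
    intro k hk
    refine (hmemM k).mpr ?_
    rcases List.mem_append.mp hk with h | h
    · exact Or.inl h
    · exact Or.inr (List.mem_filter.mp h).1
  have h1 : K.countP (fun x => (M.getD x (none, none)).1.isNone)
      = K.countP (fun x => (e.get? x).isNone) := by
    apply List.countP_congr
    intro k hk
    rw [hgetD k (hmemK k hk)]
  have h2 : K.countP (fun x => (M.getD x (none, none)).1.isSome && (M.getD x (none, none)).2.isNone)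
      = K.countP (fun x => (e.get? x).isSome && (c.get? x).isNone) := by
    apply List.countP_congr
    intro k hk
    rw [hgetD k (hmemK k hk)]
  have h3 : K.countP (fun x =>
        match M.getD x (none, none) with
        | (some o, some n) => !pyDictEq n o
        | _ => false)
      = K.countP (fun x =>
        match e.get? x, c.get? x with
        | some o, some n => !pyDictEq n o
        | _, _ => false) := by
    apply List.countP_congr
    intro k hk
    rw [hgetD k (hmemK k hk)]
    cases e.get? k <;> cases c.get? k <;> simp
  rw [h1, h2, h3]
  rw [hKdef]
  simp only [List.countP_append]
  -- A side: sets over Nodup key lists reduce to filters/counts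
  simp only [PySem.Set.ofList_eq_self_of_nodup _ he, PySem.Set.ofList_eq_self_of_nodup _ hc]
  simp only [PySem.Set.len, PySem.Set.diff, PySem.Set.inter, PySem.Set.contains,
    PySem.List.foldl_if_add_one, ← List.countP_eq_length_filter]
  refine Prod.ext ?_ (Prod.ext ?_ ?_)
  · -- added
    dsimp only
    have ha : e.keys.countP (fun x => (e.get? x).isNone) = 0 := by
      rw [List.countP_eq_zero]
      intro k hk
      simp [Option.isNone_iff_eq_none, PySem.Dict.get?_eq_none_iff_not_mem_keys, hk]
    have hb : (c.keys.filter (fun k => !decide (k ∈ e.keys))).countP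
        (fun x => (e.get? x).isNone)
        = (c.keys.filter (fun k => !decide (k ∈ e.keys))).length := by
      rw [List.countP_eq_length]
      intro k hk
      have hk2 := (List.mem_filter.mp hk).2
      simp only [Bool.not_eq_eq_eq_not, Bool.not_true, decide_eq_false_iff_not] at hk2
      simp [Option.isNone_iff_eq_none, PySem.Dict.get?_eq_none_iff_not_mem_keys, hk2]
    rw [ha, hb, Nat.zero_add, List.countP_eq_length_filter]
    congr 2
    apply List.filter_congr
    intro x _
    simp [List.contains_eq_mem]
  · -- removed
    dsimp only
    have ha : e.keys.countP (fun x => (e.get? x).isSome && (c.get? x).isNone)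
        = e.keys.countP (fun x => !c.keys.contains x) := by
      apply List.countP_congr
      intro k hk
      have hne : e.get? k ≠ none := fun h =>
        (PySem.Dict.get?_eq_none_iff_not_mem_keys e k).mp h hk
      simp [Option.isSome_iff_ne_none, Option.isNone_iff_eq_none, hne,
        PySem.Dict.get?_eq_none_iff_not_mem_keys, List.contains_eq_mem]
    have hb : (c.keys.filter (fun k => !decide (k ∈ e.keys))).countP
        (fun x => (e.get? x).isSome && (c.get? x).isNone) = 0 := by
      rw [List.countP_eq_zero]
      intro k hk
      have hk2 := (List.mem_filter.mp hk).2
      simp only [Bool.not_eq_eq_eq_not, Bool.not_true, decide_eq_false_iff_not] at hk2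
      have : e.get? k = none := (PySem.Dict.get?_eq_none_iff_not_mem_keys e k).mpr hk2
      simp [this]
    rw [ha, hb, Nat.add_zero]
  · -- updated
    dsimp only
    rw [zero_add]
    have hb : (c.keys.filter (fun k => !decide (k ∈ e.keys))).countP
        (fun x => match e.get? x, c.get? x with
          | some o, some n => !pyDictEq n o
          | _, _ => false) = 0 := by
      rw [List.countP_eq_zero]
      intro k hk
      have hk2 := (List.mem_filter.mp hk).2
      simp only [Bool.not_eq_eq_eq_not, Bool.not_true, decide_eq_false_iff_not] at hk2
      have : e.get? k = none := (PySem.Dict.get?_eq_none_iff_not_mem_keys e k).mpr hk2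
      simp [this]
    have ha : e.keys.countP
        (fun x => match e.get? x, c.get? x with
          | some o, some n => !pyDictEq n o
          | _, _ => false)
        = e.keys.countP
          (fun x => (!pyDictEq (c.getD x []) (e.getD x [])) && c.keys.contains x) := by
      apply List.countP_congr
      intro k hk
      obtain ⟨ov, hov⟩ : ∃ v, e.get? k = some v := by
        cases h : e.get? k with
        | none => exact absurd ((PySem.Dict.get?_eq_none_iff_not_mem_keys e k).mp h hk) (by simp)
        | some v => exact ⟨v, rfl⟩
      have hov' : e.getD k [] = ov := PySem.Dict.getD_of_get?_eq_some e [] hov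
      cases hcv : c.get? k with
      | none =>
        have : ¬ k ∈ c.keys := (PySem.Dict.get?_eq_none_iff_not_mem_keys c k).mp hcv
        simp [hov, List.contains_eq_mem, this]
      | some nv =>
        have hmc : k ∈ c.keys := by
          by_contra hnot
          have h0 := (PySem.Dict.get?_eq_none_iff_not_mem_keys c k).mpr hnot
          rw [h0] at hcv
          simp at hcv
        have hcv' : c.getD k [] = nv := PySem.Dict.getD_of_get?_eq_some c [] hcv
        simp [hov, hov', hcv', List.contains_eq_mem, hmc]
    rw [hb, Nat.add_zero, ha]
    rw [show (fun x => (!pyDictEq (c.getD x []) (e.getD x [])) && c.keys.contains x)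
        = (fun x => (!pyDictEq (c.getD x []) (e.getD x [])) && decide (x ∈ c.keys)) by
      funext x; rw [List.contains_eq_mem]]
    rw [← List.countP_filter]
    have hperm2 : (c.keys.filter (fun x => e.keys.contains x)).Perm
        (e.keys.filter (fun x => decide (x ∈ c.keys))) := by
      rw [List.perm_ext_iff_of_nodup (hc.filter _) (he.filter _)]
      intro k
      simp [List.mem_filter, List.contains_eq_mem, and_comm]
    rw [hperm2.countP_eq]

-- ===== VERDICT (by name: the statement is the Claim_ definition above) =====
theorem summarise_changes_spec : Claim_equal_summarise_changes := by
  intro existing current mode _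
  unfold Spec_summarise_changes
  exact main_eq existing current mode
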